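-- pv_equiv track=rewrite | github.com/Graciano-B-L-Junior/financas_pessoais_prometheus | backend/financas/views.py | _get_category_name
-- ===== SOURCE A (Python) =====
-- def _get_category_name(category_row, start_col):
--     if not category_row:
--         return ''
--     candidates = []
--     for col in range(start_col, min(start_col + 3, len(category_row))):
--         cell = category_row[col]
--         if cell is not None and str(cell).strip():
--             candidates.append(str(cell).strip())
--     if candidates:
--         return candidates[0]
--     for col in range(max(0, start_col - 2), start_col):
--         cell = category_row[col]
--         if cell is not None and str(cell).strip():
--             return str(cell).strip()
--     return ''
-- ===== SOURCE B (Python) =====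
-- def _get_category_name(category_row, start_col):
--     # Alternative algorithm: one indexing-free pass over enumerate(row).
--     # Each qualifying cell gets a priority (0-2 forward window, 3-4 backward
--     # window); the minimum-priority non-blank text wins.  start_col is treated
--     # as a plain column position (no negative-index wraparound).
--     best = None
--     for i, cell in enumerate(category_row):
--         text = '' if cell is None else str(cell).strip()
--         if not text:
--             continue
--         if start_col <= i < start_col + 3:
--             pr = i - start_col
--         elif start_col - 2 <= i < start_col:
--             pr = i - start_col + 5
--         else:
--             continue
--         if best is None or pr < best[0]:
--             best = (pr, text)
--     return best[1] if best is not None else ''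
-- ===== Notes on version B (the rewrite author's own statement) =====
-- stated objective: alternative
-- what changed: Replaced the two index-probing window loops by a single indexing-free pass over enumerate(row) that assigns each qualifying non-blank cell a priority (0-2 forward window, 3-4 backward window) and keeps the minimum-priority text; this trades the constant number of index probes for one scan of the row.
-- intended difference: On start_col < 0 with a non-blank cell among the wrapped end-of-row positions that A's negative-index probing reaches, A returns that wrapped cell's stripped text (e.g. 'B', the last cell, at start_col=-1 on [Some "A", Some "B"]) while B treats start_col as a plain column position, probes only the clamped windows and returns 'A'; a spreadsheet column index is not meant to wrap. — e.g. on _get_category_name([some "A", some "B"], -1): A returns "B", B returns "A"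
import Mathlib
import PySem

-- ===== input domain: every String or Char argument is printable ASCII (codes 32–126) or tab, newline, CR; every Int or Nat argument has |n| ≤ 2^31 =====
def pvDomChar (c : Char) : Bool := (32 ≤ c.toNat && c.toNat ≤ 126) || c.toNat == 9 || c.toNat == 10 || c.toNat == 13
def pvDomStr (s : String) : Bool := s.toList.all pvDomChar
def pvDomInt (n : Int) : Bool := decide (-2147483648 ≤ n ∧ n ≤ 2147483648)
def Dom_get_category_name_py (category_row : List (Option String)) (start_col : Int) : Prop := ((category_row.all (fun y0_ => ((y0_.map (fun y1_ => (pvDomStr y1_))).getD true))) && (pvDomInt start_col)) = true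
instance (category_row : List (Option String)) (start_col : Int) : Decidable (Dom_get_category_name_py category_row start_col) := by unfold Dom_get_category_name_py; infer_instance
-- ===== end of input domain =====

-- B is an alternative algorithm: one indexing-free pass over the enumerated row keeping the
-- minimum-priority non-blank cell, instead of A's two index-probing window loops; for
-- start_col < 0 B intentionally does not reproduce A's negative-index wraparound (see D_).

-- ===== PORT A =====
-- A's first loop body: append str(cell).strip() to candidates when nonblank
-- (an out-of-range index raises in Python; such inputs are excluded by Pre_, skipped here).
def pvCandStep (category_row : List (Option String)) (acc : List String) (col : Int) : List String :=
  match PySem.List.pyGet? category_row col with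
  | some (some s) => if PySem.Str.strip s ≠ "" then acc ++ [PySem.Str.strip s] else acc
  | _ => acc

-- A's second loop: early-return scan over the backward index range.
def pvBackScan (category_row : List (Option String)) : List Int → String
  | [] => ""
  | col :: rest =>
    match PySem.List.pyGet? category_row col with
    | some (some s) =>
        if PySem.Str.strip s ≠ "" then PySem.Str.strip s else pvBackScan category_row rest
    | _ => pvBackScan category_row rest

def get_category_name_py (category_row : List (Option String)) (start_col : Int) : String :=
  if category_row = [] then ""
  else
    let candidates :=
      (PySem.List.pyRange start_col (min (start_col + 3) (category_row.length : Int)) 1).foldl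
        (pvCandStep category_row) []
    match candidates with
    | c :: _ => c
    | [] => pvBackScan category_row (PySem.List.pyRange (max 0 (start_col - 2)) start_col 1)

-- ===== PORT B =====
-- B's priority of a column position: 0..2 in the forward window, 3..4 in the backward window.
def pvPr (s i : Int) : Option Int :=
  if s ≤ i ∧ i < s + 3 then some (i - s)
  else if s - 2 ≤ i ∧ i < s then some (i - s + 5)
  else none

-- one iteration of B's loop body over an enumerated (index, cell) pair
def pvBestStep (s : Int) (best : Option (Int × String)) (ic : Int × Option String) : Option (Int × String) :=
  let text := match ic.2 with | none => "" | some c => PySem.Str.strip c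
  if text = "" then best
  else
    match pvPr s ic.1 with
    | none => best
    | some pr =>
      match best with
      | none => some (pr, text)
      | some b => if pr < b.1 then some (pr, text) else best

def get_category_name_py_alt (category_row : List (Option String)) (start_col : Int) : String :=
  match (PySem.List.enumerate category_row 0).foldl (pvBestStep start_col) none with
  | some b => b.2
  | none => ""

-- ===== PRECONDITION & SPEC =====
-- a cell that passes Python's 'cell is not None and str(cell).strip()' test
def pvNonblank (cell : Option String) : Bool :=
  match cell with
  | some s => PySem.Str.strip s ≠ ""
  | none => false

-- Exactly the inputs on which the Python A returns (no IndexError): the row is empty,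
-- or start_col is within [-len, len] (all probed indices are then in range), or
-- start_col > len but some in-range backward cell is nonblank so A returns before
-- probing an out-of-range index.
def Pre_get_category_name_py (category_row : List (Option String)) (start_col : Int) : Prop :=
  category_row = [] ∨
    (-(category_row.length : Int) ≤ start_col ∧
      (start_col ≤ (category_row.length : Int) ∨
        ∃ i ∈ List.range category_row.length,
          start_col - 2 ≤ (i : Int) ∧ pvNonblank (category_row.getD i none) = true))
instance (category_row : List (Option String)) (start_col : Int) : Decidable (Pre_get_category_name_py category_row start_col) := by unfold Pre_get_category_name_py; infer_instance

def pvWitness_get_category_name_py : List (Option String) × Int := ([some " Food ", none], 0)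

-- a cell containing at least one non-whitespace character (i.e. one Python would keep after strip)
def pvHasInk (cell : Option String) : Bool :=
  match cell with
  | some s => s.toList.any (fun ch => ! PySem.Chars.isspace ch)
  | none => false

-- On start_col < 0 with a non-blank cell among the wrapped (end-of-row) positions that A's
-- negative-index probing reaches, A returns that wrapped cell's stripped text while B treats
-- start_col as a plain column position and probes only the clamped windows; a spreadsheet
-- column index is not meant to wrap.
def D_get_category_name_py (category_row : List (Option String)) (start_col : Int) : Prop :=
  start_col < 0 ∧ category_row ≠ [] ∧
    ∃ i ∈ List.range category_row.length,
      (category_row.length : Int) + start_col ≤ (i : Int) ∧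
      (i : Int) < (category_row.length : Int) + min 0 (start_col + 3) ∧
      pvHasInk (category_row.getD i none) = true
instance (category_row : List (Option String)) (start_col : Int) : Decidable (D_get_category_name_py category_row start_col) := by unfold D_get_category_name_py; infer_instance

def Spec_get_category_name_py (category_row : List (Option String)) (start_col : Int) (out : String) : Prop := ¬ D_get_category_name_py category_row start_col → out = get_category_name_py_alt category_row start_col
instance (category_row : List (Option String)) (start_col : Int) (out : String) : Decidable (Spec_get_category_name_py category_row start_col out) := by unfold Spec_get_category_name_py; infer_instance

def pvDiffWitness_get_category_name_py : List (Option String) × Int := ([some "A", some "B"], -1)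
def pvDiffWitnessOut_get_category_name_py : String × String := ("B", "A")

-- ===== CLAIM (what is proved, stated in full; the proofs are below) =====
def Claim_unchanged_get_category_name_py : Prop := ∀ (category_row : List (Option String)) (start_col : Int), Dom_get_category_name_py category_row start_col → Pre_get_category_name_py category_row start_col → Spec_get_category_name_py category_row start_col (get_category_name_py category_row start_col)
def Claim_changed_get_category_name_py : Prop := Dom_get_category_name_py (pvDiffWitness_get_category_name_py.1) (pvDiffWitness_get_category_name_py.2) ∧ Pre_get_category_name_py (pvDiffWitness_get_category_name_py.1) (pvDiffWitness_get_category_name_py.2) ∧ D_get_category_name_py (pvDiffWitness_get_category_name_py.1) (pvDiffWitness_get_category_name_py.2) ∧ get_category_name_py (pvDiffWitness_get_category_name_py.1) (pvDiffWitness_get_category_name_py.2) = pvDiffWitnessOut_get_category_name_py.1 ∧ get_category_name_py_alt (pvDiffWitness_get_category_name_py.1) (pvDiffWitness_get_category_name_py.2) = pvDiffWitnessOut_get_category_name_py.2 ∧ pvDiffWitnessOut_get_category_name_py.1 ≠ pvDiffWitnessOut_get_category_name_py.2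

-- ===== LEMMAS AND PROOFS =====

-- the stripped text of a cell when it passes the nonblank guard
def pvNB (c : Option String) : Option String :=
  match c with
  | some str => if PySem.Str.strip str = "" then none else some (PySem.Str.strip str)
  | none => none

-- first cell (by ascending position) whose index lies in [a, b) and which is nonblank
def pvCellScan (a b : Int) : Int → List (Option String) → String
  | _, [] => ""
  | j, c :: r =>
    match pvNB c with
    | some t => if a ≤ j ∧ j < b then t else pvCellScan a b (j + 1) r
    | none => pvCellScan a b (j + 1) r

-- keep the entry with the smaller priority (left wins ties)
def pvChoose (x y : Option (Int × String)) : Option (Int × String) :=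
  match x, y with
  | none, y => y
  | x, none => x
  | some a, some b => if b.1 < a.1 then some b else some a

def pvCand (s j : Int) (c : Option String) : Option (Int × String) :=
  match pvNB c with
  | none => none
  | some t =>
    match pvPr s j with
    | none => none
    | some pr => some (pr, t)

-- minimum-priority qualifying entry of the cells at positions j, j+1, …
def pvMin (s : Int) : Int → List (Option String) → Option (Int × String)
  | _, [] => none
  | j, c :: r => pvChoose (pvCand s j c) (pvMin s (j + 1) r)

theorem pvChoose_assoc (x y z : Option (Int × String)) :
    pvChoose (pvChoose x y) z = pvChoose x (pvChoose y z) := by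
  rcases x with _ | a
  · rfl
  · rcases y with _ | b
    · rfl
    · rcases z with _ | c
      · simp only [pvChoose]; split_ifs <;> rfl
      · by_cases h1 : b.1 < a.1 <;> by_cases h2 : c.1 < b.1 <;>
          simp only [pvChoose, h1, h2, if_true, if_false] <;>
          (split_ifs <;> (first | rfl | (exfalso; omega)))

theorem pvBestStep_eq (s j : Int) (c : Option String) (best : Option (Int × String)) :
    pvBestStep s best (j, c) = pvChoose best (pvCand s j c) := by
  rcases c with _ | str
  · rcases best with _ | b <;> simp [pvBestStep, pvCand, pvNB, pvChoose]
  · simp only [pvBestStep, pvCand, pvNB]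
    by_cases h : PySem.Str.strip str = ""
    · rcases best with _ | b <;> simp [h, pvChoose]
    · simp only [h, if_neg h, if_false]
      cases pvPr s j with
      | none => rcases best with _ | b <;> simp [pvChoose]
      | some pr => rcases best with _ | b <;> simp [pvChoose]

theorem pvLoop_eq (s : Int) (cells : List (Option String)) :
    ∀ (j : Int) (best : Option (Int × String)),
      (PySem.List.enumerate cells j).foldl (pvBestStep s) best = pvChoose best (pvMin s j cells) := by
  induction cells with
  | nil => intro j best; cases best <;> simp [PySem.List.enumerate_nil, pvMin, pvChoose]
  | cons c r ih =>
    intro j best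
    rw [PySem.List.enumerate_cons, List.foldl_cons, ih (j + 1), pvBestStep_eq,
        pvChoose_assoc]
    rfl

-- every entry of pvMin has a priority in [0,5), F-entries (< 3) have pr ≥ j - s,
-- B-entries (≥ 3) have pr ≥ j - s + 5
theorem pvMin_bounds (s : Int) (cells : List (Option String)) :
    ∀ (j : Int) (e : Int × String), pvMin s j cells = some e →
      0 ≤ e.1 ∧ e.1 < 5 ∧ (e.1 < 3 → j - s ≤ e.1) ∧ (3 ≤ e.1 → j - s + 5 ≤ e.1) := by
  induction cells with
  | nil => intro j e h; simp [pvMin] at h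
  | cons c r ih =>
    intro j e h
    simp only [pvMin] at h
    rcases hc : pvCand s j c with _ | p
    · rw [hc] at h
      simp only [pvChoose] at h
      have := ih (j + 1) e h
      omega
    · have hp : 0 ≤ p.1 ∧ p.1 < 5 ∧ (p.1 < 3 → j - s ≤ p.1) ∧ (3 ≤ p.1 → j - s + 5 ≤ p.1) := by
        simp only [pvCand] at hc
        rcases hnbc : pvNB c with _ | t
        · rw [hnbc] at hc; exact absurd hc (by simp)
        · rw [hnbc] at hc
          simp only [pvPr] at hc
          split_ifs at hc with h1 h2
          all_goals first
            | (dsimp only at hc; cases hc; dsimp only; omega)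
            | (exact absurd hc (by simp))
      rw [hc] at h
      rcases hm : pvMin s (j + 1) r with _ | e'
      · rw [hm] at h; simp only [pvChoose] at h
        cases h; exact hp
      · have he' := ih (j + 1) e' hm
        rw [hm] at h; simp only [pvChoose] at h
        split_ifs at h <;> cases h <;> constructor <;> omega

-- full characterisation of pvMin by the two window scans
theorem pvMin_char (s : Int) (cells : List (Option String)) :
    ∀ (j : Int),
      (pvCellScan s (s + 3) j cells ≠ "" →
        ∃ pr, pvMin s j cells = some (pr, pvCellScan s (s + 3) j cells) ∧
          0 ≤ pr ∧ pr < 3 ∧ j - s ≤ pr)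
      ∧ (pvCellScan s (s + 3) j cells = "" → pvCellScan (s - 2) s j cells ≠ "" →
        ∃ pr, pvMin s j cells = some (pr, pvCellScan (s - 2) s j cells) ∧
          3 ≤ pr ∧ pr < 5 ∧ j - s + 5 ≤ pr)
      ∧ (pvCellScan s (s + 3) j cells = "" → pvCellScan (s - 2) s j cells = "" →
        pvMin s j cells = none) := by
  induction cells with
  | nil => intro j; simp [pvCellScan, pvMin]
  | cons c r ih =>
    intro j
    obtain ⟨ihF, ihB, ihN⟩ := ih (j + 1)
    rcases hnb : pvNB c with _ | t
    · -- blank cell: everything reduces to the tail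
      simp only [pvCellScan, pvMin, pvCand, hnb]
      refine ⟨fun hF => ?_, fun hF hB => ?_, fun hF hB => ?_⟩
      · obtain ⟨pr, h1, h2, h3, h4⟩ := ihF hF
        exact ⟨pr, by simpa [pvChoose] using h1, h2, h3, by omega⟩
      · obtain ⟨pr, h1, h2, h3, h4⟩ := ihB hF hB
        exact ⟨pr, by simpa [pvChoose] using h1, h2, h3, by omega⟩
      · simpa [pvChoose] using ihN hF hB
    · have ht : t ≠ "" := by
        rcases c with _ | str
        · simp [pvNB] at hnb
        · by_cases h : PySem.Str.strip str = ""
          · simp [pvNB, h] at hnb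
          · simp [pvNB, h] at hnb
            exact hnb ▸ h
      by_cases hFwin : s ≤ j ∧ j < s + 3
      · -- forward-window nonblank cell: it is the forward scan's answer and the minimum
        have hcand : pvCand s j c = some (j - s, t) := by
          simp [pvCand, hnb, pvPr, hFwin]
        have hFs : pvCellScan s (s + 3) j (c :: r) = t := by
          simp [pvCellScan, hnb, hFwin]
        refine ⟨fun _ => ?_, fun hF _ => ?_, fun hF _ => ?_⟩
        · refine ⟨j - s, ?_, by omega, by omega, by omega⟩
          rw [hFs]
          simp only [pvMin, hcand]
          rcases hm : pvMin s (j + 1) r with _ | e'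
          · simp [pvChoose]
          · have hb := pvMin_bounds s r (j + 1) e' hm
            simp only [pvChoose]
            rw [if_neg (by omega)]
        · rw [hFs] at hF; exact absurd hF ht
        · rw [hFs] at hF; exact absurd hF ht
      · by_cases hBwin : s - 2 ≤ j ∧ j < s
        · -- backward-window nonblank cell
          have hcand : pvCand s j c = some (j - s + 5, t) := by
            simp only [pvCand, hnb, pvPr]
            rw [if_neg hFwin, if_pos hBwin]
          have hFs : pvCellScan s (s + 3) j (c :: r) = pvCellScan s (s + 3) (j + 1) r := by
            simp only [pvCellScan, hnb]; rw [if_neg hFwin]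
          have hBs : pvCellScan (s - 2) s j (c :: r) = t := by
            simp [pvCellScan, hnb, hBwin]
          simp only [pvMin, hcand, hFs, hBs]
          refine ⟨fun hF => ?_, fun hF _ => ?_, fun hF hB => ?_⟩
          · obtain ⟨pr, h1, h2, h3, h4⟩ := ihF hF
            refine ⟨pr, ?_, h2, h3, by omega⟩
            rw [h1]
            simp only [pvChoose]
            rw [if_pos (by omega)]
          · refine ⟨j - s + 5, ?_, by omega, by omega, by omega⟩
            rcases hm : pvMin s (j + 1) r with _ | e'
            · simp [pvChoose]
            · have hb := pvMin_bounds s r (j + 1) e' hm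
              have hBc : pvCellScan (s - 2) s (j + 1) r = "" ∨
                  pvCellScan (s - 2) s (j + 1) r ≠ "" := by tauto
              simp only [pvChoose]
              rw [if_neg ?_]
              rcases hBc with hB' | hB'
              · have := ihN hF hB'; rw [this] at hm; cases hm
              · obtain ⟨pr, h1, h2, h3, h4⟩ := ihB hF hB'
                rw [h1] at hm; cases hm; simp; omega
          · exact absurd hB ht
        · -- outside both windows: reduces to the tail
          have hcand : pvCand s j c = none := by
            simp only [pvCand, hnb, pvPr]
            rw [if_neg hFwin, if_neg hBwin]
          have hFs : pvCellScan s (s + 3) j (c :: r) = pvCellScan s (s + 3) (j + 1) r := by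
            simp only [pvCellScan, hnb]; rw [if_neg hFwin]
          have hBs : pvCellScan (s - 2) s j (c :: r) = pvCellScan (s - 2) s (j + 1) r := by
            simp only [pvCellScan, hnb]; rw [if_neg hBwin]
          simp only [pvMin, hcand, hFs, hBs]
          refine ⟨fun hF => ?_, fun hF hB => ?_, fun hF hB => ?_⟩
          · obtain ⟨pr, h1, h2, h3, h4⟩ := ihF hF
            exact ⟨pr, by simpa [pvChoose] using h1, h2, h3, by omega⟩
          · obtain ⟨pr, h1, h2, h3, h4⟩ := ihB hF hB
            exact ⟨pr, by simpa [pvChoose] using h1, h2, h3, by omega⟩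
          · simpa [pvChoose] using ihN hF hB

-- B computes: forward-window first nonblank if any, else backward-window first nonblank
theorem alt_char (row : List (Option String)) (s : Int) :
    get_category_name_py_alt row s =
      (if pvCellScan s (s + 3) 0 row = "" then pvCellScan (s - 2) s 0 row
       else pvCellScan s (s + 3) 0 row) := by
  unfold get_category_name_py_alt
  rw [pvLoop_eq]
  obtain ⟨hF, hB, hN⟩ := pvMin_char s row 0
  by_cases h1 : pvCellScan s (s + 3) 0 row = ""
  · by_cases h2 : pvCellScan (s - 2) s 0 row = ""
    · rw [hN h1 h2]; simp [pvChoose, h1, h2]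
    · obtain ⟨pr, he, _⟩ := hB h1 h2
      rw [he]; simp [pvChoose, h1]
  · obtain ⟨pr, he, _⟩ := hF h1
    rw [he]; simp [pvChoose, h1]

-- ---- A-side characterisation ----

def pvCands (row : List (Option String)) (cols : List Int) : List String :=
  cols.filterMap (fun col => (PySem.List.pyGet? row col).bind pvNB)

theorem pvCandStep_eq_cands (row : List (Option String)) (acc : List String) (col : Int) :
    pvCandStep row acc col = acc ++ ((PySem.List.pyGet? row col).bind pvNB).toList := by
  unfold pvCandStep
  rcases hg : PySem.List.pyGet? row col with _ | c
  · simp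
  · rcases c with _ | str
    · simp [pvNB]
    · simp only [pvNB, Option.bind_some]
      split_ifs with h <;> simp_all

theorem foldl_cands (row : List (Option String)) (cols : List Int) :
    ∀ acc, cols.foldl (pvCandStep row) acc = acc ++ pvCands row cols := by
  induction cols with
  | nil => intro acc; simp [pvCands]
  | cons col rest ih =>
    intro acc
    rw [List.foldl_cons, ih, pvCandStep_eq_cands]
    simp only [pvCands, List.filterMap_cons]
    rcases (PySem.List.pyGet? row col).bind pvNB with _ | t <;> simp

theorem backScan_eq (row : List (Option String)) (cols : List Int) :
    pvBackScan row cols = (pvCands row cols).headD "" := by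
  induction cols with
  | nil => simp [pvBackScan, pvCands]
  | cons col rest ih =>
    simp only [pvBackScan, pvCands, List.filterMap_cons]
    rcases hg : PySem.List.pyGet? row col with _ | c
    · simpa [pvCands] using ih
    · rcases c with _ | str
      · simpa [pvNB, pvCands] using ih
      · simp only [pvNB, Option.bind_some]
        by_cases h : PySem.Str.strip str = ""
        · simpa [h, pvCands] using ih
        · simp [h]

theorem cands_ne (row : List (Option String)) (cols : List Int) :
    ∀ x ∈ pvCands row cols, x ≠ "" := by
  intro x hx
  simp only [pvCands, List.mem_filterMap] at hx
  obtain ⟨col, _, h⟩ := hx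
  rcases hg : PySem.List.pyGet? row col with _ | c
  · rw [hg] at h; simp at h
  · rw [hg] at h
    rcases c with _ | str
    · simp [pvNB] at h
    · simp only [Option.bind_some, pvNB] at h
      split_ifs at h with hs
      injection h with h
      rw [← h]; exact hs

-- window-guard congruence for pvCellScan
theorem pvCellScan_congr (a b a' b' : Int) (cells : List (Option String)) :
    ∀ (j : Int),
      (∀ i : Int, j ≤ i → i < j + cells.length → ((a ≤ i ∧ i < b) ↔ (a' ≤ i ∧ i < b'))) →
      pvCellScan a b j cells = pvCellScan a' b' j cells := by
  induction cells with
  | nil => intro j _; rfl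
  | cons c r ih =>
    intro j hiff
    have hj := hiff j (le_refl j) (by simp only [List.length_cons]; omega)
    simp only [pvCellScan]
    rcases pvNB c with _ | t
    · dsimp only
      exact ih (j + 1) (fun i h1 h2 => hiff i (by omega)
        (by simp only [List.length_cons]; omega))
    · dsimp only
      by_cases hw : a ≤ j ∧ j < b
      · rw [if_pos hw, if_pos (hj.mp hw)]
      · rw [if_neg hw, if_neg (fun h => hw (hj.mpr h))]
        exact ih (j + 1) (fun i h1 h2 => hiff i (by omega)
          (by simp only [List.length_cons]; omega))

theorem pvCellScan_of_empty_window (a b : Int) (cells : List (Option String)) :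
    ∀ (j : Int), b ≤ a → pvCellScan a b j cells = "" := by
  induction cells with
  | nil => intro j _; rfl
  | cons c r ih =>
    intro j hba
    simp only [pvCellScan]
    rcases pvNB c with _ | t
    · exact ih (j + 1) hba
    · dsimp only
      rw [if_neg (by omega : ¬(a ≤ j ∧ j < b))]
      exact ih (j + 1) hba

theorem backScan_skip (row : List (Option String)) :
    ∀ (k : Nat) (a b : Int), (b - a).toNat ≤ k → (row.length : Int) ≤ a →
      pvBackScan row (PySem.List.pyRange a b 1) = "" := by
  intro k
  induction k with
  | zero =>
    intro a b hk ha
    rw [PySem.List.pyRange_one_eq_nil (by omega)]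
    rfl
  | succ k ih =>
    intro a b hk ha
    by_cases hab : a < b
    · rw [PySem.List.pyRange_one_cons hab]
      simp only [pvBackScan]
      have hnone : PySem.List.pyGet? row a = none := by
        rw [PySem.List.pyGet?_eq_none_iff]
        simp only [PySem.Raise.InRange]
        omega
      rw [hnone]
      exact ih (a + 1) b (by omega) (by omega)
    · rw [PySem.List.pyRange_one_eq_nil (by omega)]; rfl

-- A's index-range scan equals the cell scan over the row suffix
theorem backScan_eq_cellScan (row : List (Option String)) :
    ∀ (cells : List (Option String)) (n : Nat) (a b : Int),
      row.drop n = cells → (n : Int) ≤ a →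
      pvBackScan row (PySem.List.pyRange a b 1) = pvCellScan a b (n : Int) cells := by
  intro cells
  induction cells with
  | nil =>
    intro n a b hdrop hna
    have hlen : row.length ≤ n := by
      by_contra h
      push_neg at h
      have := List.drop_eq_getElem_cons h
      rw [hdrop] at this
      cases this
    rw [pvCellScan]
    exact backScan_skip row (b - a).toNat a b le_rfl (by push_cast; omega)
  | cons c r ih =>
    intro n a b hdrop hna
    have hn : n < row.length := by
      by_contra h
      push_neg at h
      rw [List.drop_eq_nil_of_le h] at hdrop
      cases hdrop
    have hcell : row[n] = c ∧ row.drop (n + 1) = r := by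
      have := List.drop_eq_getElem_cons hn
      rw [hdrop] at this
      exact ⟨(List.cons.injEq _ _ _ _ ▸ this).1.symm, ((List.cons.injEq _ _ _ _ ▸ this).2).symm⟩
    by_cases hja : (n : Int) < a
    · -- position below the window start: step the cell scan only
      have : pvCellScan a b (n : Int) (c :: r) = pvCellScan a b ((n : Int) + 1) r := by
        simp only [pvCellScan]
        rcases pvNB c with _ | t
        · rfl
        · dsimp only
          rw [if_neg (by omega : ¬(a ≤ (n : Int) ∧ (n : Int) < b))]
      rw [this]
      have := ih (n + 1) a b hcell.2 (by push_cast; omega)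
      push_cast at this ⊢
      rw [this]
    · have hje : (n : Int) = a := by omega
      by_cases hab : a < b
      · rw [PySem.List.pyRange_one_cons hab]
        simp only [pvBackScan, pvCellScan]
        have hget : PySem.List.pyGet? row a = some c := by
          rw [← hje, ← hcell.1, PySem.List.pyGet?_natCast]
          exact List.getElem?_eq_getElem hn
        rw [hget]
        have htail : pvBackScan row (PySem.List.pyRange (a + 1) b 1)
            = pvCellScan a b ((n : Int) + 1) r := by
          have h1 := ih (n + 1) (a + 1) b hcell.2 (by push_cast; omega)
          push_cast at h1
          rw [h1]
          exact pvCellScan_congr (a + 1) b a b r ((n : Int) + 1)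
            (fun i h1 h2 => by omega)
        rcases c with _ | str
        · simp only [pvNB]; exact htail
        · simp only [pvNB]
          by_cases hs : PySem.Str.strip str = ""
          · simp only [hs, if_pos rfl]
            rw [if_neg (by simp)]
            exact htail
          · simp only [hs, if_neg hs, if_false]
            rw [if_pos hs, if_pos ⟨by omega, by omega⟩]
      · rw [PySem.List.pyRange_one_eq_nil (by omega)]
        rw [pvCellScan_of_empty_window a b (c :: r) (n : Int) (by omega)]
        rfl

-- A computes the same staged result for 0 ≤ start_col
theorem a_char (row : List (Option String)) (s : Int) (hs : 0 ≤ s) (hrow : row ≠ []) :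
    get_category_name_py row s =
      (if pvCellScan s (s + 3) 0 row = "" then pvCellScan (s - 2) s 0 row
       else pvCellScan s (s + 3) 0 row) := by
  unfold get_category_name_py
  rw [if_neg hrow]
  have hF : pvBackScan row (PySem.List.pyRange s (min (s + 3) (row.length : Int)) 1)
      = pvCellScan s (s + 3) 0 row := by
    rw [backScan_eq_cellScan row row 0 s (min (s + 3) (row.length : Int)) (by simp)
      (by exact_mod_cast hs)]
    exact pvCellScan_congr s (min (s + 3) (row.length : Int)) s (s + 3) row 0
      (fun i h1 h2 => by simp at h2; omega)
  have hB : pvBackScan row (PySem.List.pyRange (max 0 (s - 2)) s 1)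
      = pvCellScan (s - 2) s 0 row := by
    rw [backScan_eq_cellScan row row 0 (max 0 (s - 2)) s (by simp) (by simp)]
    exact pvCellScan_congr (max 0 (s - 2)) s (s - 2) s row 0
      (fun i h1 h2 => by omega)
  rw [foldl_cands, List.nil_append]
  rw [backScan_eq] at hF
  rcases hc : pvCands row (PySem.List.pyRange s (min (s + 3) (row.length : Int)) 1) with _ | ⟨c, rest⟩
  · rw [hc] at hF
    simp only [List.headD_nil] at hF
    rw [if_pos hF.symm]
    exact hB
  · rw [hc] at hF
    simp only [List.headD_cons] at hF
    have hcne : c ≠ "" := cands_ne _ _ c (by rw [hc]; exact List.mem_cons_self)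
    rw [if_neg (by rw [← hF]; exact hcne)]
    simp only [← hF]

-- the whole window lies below every scanned position: nothing qualifies
theorem pvCellScan_of_le (a b : Int) (cells : List (Option String)) :
    ∀ (j : Int), b ≤ j → pvCellScan a b j cells = "" := by
  induction cells with
  | nil => intro j _; rfl
  | cons c r ih =>
    intro j hbj
    simp only [pvCellScan]
    rcases pvNB c with _ | t
    · exact ih (j + 1) (by omega)
    · dsimp only
      rw [if_neg (by omega : ¬(a ≤ j ∧ j < b))]
      exact ih (j + 1) (by omega)

theorem pvNB_eq_none_iff (c : Option String) : pvNB c = none ↔ pvNonblank c = false := by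
  rcases c with _ | str
  · simp [pvNB, pvNonblank]
  · by_cases h : PySem.Str.strip str = "" <;> simp [pvNB, pvNonblank, h]

theorem strip_empty_iff (s : String) :
    (PySem.Str.strip s = "") ↔ ∀ c ∈ s.toList, PySem.Chars.isspace c = true := by
  rw [← String.toList_inj, PySem.Str.toList_strip]
  have hnil : ("" : String).toList = [] := rfl
  rw [hnil]
  simp only [PySem.Chars.strip, PySem.Chars.rstrip, PySem.Chars.lstrip,
    List.reverse_eq_nil_iff, List.dropWhile_eq_nil_iff, List.mem_reverse]
  constructor
  · intro h c hc
    have hsplit := List.takeWhile_append_dropWhile (p := PySem.Chars.isspace) (l := s.toList)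
    rw [← hsplit] at hc
    rcases List.mem_append.mp hc with h1 | h2
    · exact List.mem_takeWhile_imp h1
    · exact h c h2
  · intro h c hc
    exact h c ((List.dropWhile_sublist _).subset hc)

theorem pvHasInk_eq (c : Option String) : pvHasInk c = pvNonblank c := by
  rcases c with _ | s
  · rfl
  · simp only [pvHasInk, pvNonblank]
    by_cases h : PySem.Str.strip s = ""
    · have hall := (strip_empty_iff s).mp h
      simp only [h, ne_eq, not_true_eq_false, decide_false]
      rw [List.any_eq_false]
      intro c hc
      simp [hall c hc]
    · simp only [ne_eq, h, not_false_iff, decide_true]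
      have hex : ¬ ∀ c ∈ s.toList, PySem.Chars.isspace c = true :=
        fun hall => h ((strip_empty_iff s).mpr hall)
      push_neg at hex
      obtain ⟨c, hc, hns⟩ := hex
      exact List.any_eq_true.mpr ⟨c, hc, by simp [hns]⟩

-- for start_col < 0 inside Pre_, if every wrapped cell A probes is blank, A agrees with B
theorem neg_char (row : List (Option String)) (s : Int) (hrow : row ≠ [])
    (hs : s < 0) (hlen : -(row.length : Int) ≤ s)
    (hbl : ∀ i : Nat, i < row.length → (row.length : Int) + s ≤ (i : Int) →
      (i : Int) < (row.length : Int) + min 0 (s + 3) →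
      pvNonblank (row.getD i none) = false) :
    get_category_name_py row s = get_category_name_py_alt row s := by
  have hlen1 : 0 < row.length := List.length_pos_of_ne_nil hrow
  -- any negative probed column hits a blank wrapped cell
  have hblankcol : ∀ col : Int, s ≤ col → col < 0 → col < s + 3 →
      (PySem.List.pyGet? row col).bind pvNB = none := by
    intro col h1 h2 h3
    obtain ⟨k, hk⟩ : ∃ k : Nat, col = -(k : Int) := ⟨(-col).toNat, by omega⟩
    subst hk
    rw [PySem.List.pyGet?_neg_natCast row k (by omega) (by omega)]
    have hilt : row.length - k < row.length := by omega
    rw [List.getElem?_eq_getElem hilt]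
    rw [Option.bind_some, pvNB_eq_none_iff]
    have hgetd : row.getD (row.length - k) none = row[row.length - k] := by
      rw [List.getD_eq_getElem?_getD, List.getElem?_eq_getElem hilt]
      rfl
    rw [← hgetd]
    exact hbl (row.length - k) hilt (by push_cast; omega) (by push_cast; omega)
  have hFB : pvCellScan (s - 2) s 0 row = "" := pvCellScan_of_le _ _ _ 0 (by omega)
  unfold get_category_name_py
  rw [if_neg hrow]
  have hbwd : PySem.List.pyRange (max 0 (s - 2)) s 1 = [] :=
    PySem.List.pyRange_one_eq_nil (by omega)
  rw [hbwd, foldl_cands, List.nil_append]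
  by_cases hm : min (s + 3) ((row.length : Int)) ≤ 0
  · -- the forward range is entirely negative: every candidate is a blank wrapped cell
    have hs3 : s + 3 ≤ 0 := by omega
    have hnil : pvCands row (PySem.List.pyRange s (min (s + 3) ((row.length : Int))) 1) = [] := by
      simp only [pvCands, List.filterMap_eq_nil_iff]
      intro col hcol
      rw [PySem.List.mem_pyRange_one] at hcol
      exact hblankcol col hcol.1 (by omega) (by omega)
    rw [hnil]
    have hF : pvCellScan s (s + 3) 0 row = "" := pvCellScan_of_le _ _ _ 0 (by omega)
    rw [alt_char, if_pos hF, hFB]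
    rfl
  · -- the forward range has a non-negative part; the negative part contributes no candidate
    have hm' : 0 ≤ min (s + 3) ((row.length : Int)) := by omega
    rw [PySem.List.pyRange_one_append s 0 (min (s + 3) ((row.length : Int))) (by omega) hm']
    have happ : pvCands row (PySem.List.pyRange s 0 1 ++
        PySem.List.pyRange 0 (min (s + 3) ((row.length : Int))) 1)
        = pvCands row (PySem.List.pyRange s 0 1)
          ++ pvCands row (PySem.List.pyRange 0 (min (s + 3) ((row.length : Int))) 1) := by
      simp [pvCands]
    have hnil : pvCands row (PySem.List.pyRange s 0 1) = [] := by
      simp only [pvCands, List.filterMap_eq_nil_iff]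
      intro col hcol
      rw [PySem.List.mem_pyRange_one] at hcol
      exact hblankcol col hcol.1 (by omega) (by omega)
    rw [happ, hnil, List.nil_append]
    have hmatch : (match pvCands row (PySem.List.pyRange 0 (min (s + 3) ((row.length : Int))) 1) with
        | c :: _ => c
        | [] => pvBackScan row []) =
        (pvCands row (PySem.List.pyRange 0 (min (s + 3) ((row.length : Int))) 1)).headD "" := by
      cases pvCands row (PySem.List.pyRange 0 (min (s + 3) ((row.length : Int))) 1) <;> rfl
    rw [hmatch, ← backScan_eq]
    have hcore := backScan_eq_cellScan row row 0 0 (min (s + 3) ((row.length : Int)))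
      (by simp) (by omega)
    push_cast at hcore
    rw [hcore]
    have hgc : pvCellScan 0 (min (s + 3) ((row.length : Int))) 0 row
        = pvCellScan s (s + 3) 0 row :=
      pvCellScan_congr 0 (min (s + 3) ((row.length : Int))) s (s + 3) row 0
        (fun i h1 h2 => by omega)
    rw [hgc, alt_char, hFB]
    split_ifs with h
    · exact h
    · rfl

-- ===== VERDICT (by name: the statements are the Claim_ definitions above) =====
theorem get_category_name_py_spec : Claim_unchanged_get_category_name_py := by
  intro row s _ hpre
  unfold Spec_get_category_name_py
  intro hnd
  by_cases hrow : row = []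
  · subst hrow
    simp [get_category_name_py, get_category_name_py_alt, PySem.List.enumerate_nil]
  · by_cases hs : 0 ≤ s
    · rw [a_char row s hs hrow, alt_char row s]
    · push_neg at hs
      have hlen : -(row.length : Int) ≤ s := by
        rcases hpre with h | ⟨h1, _⟩
        · exact absurd h hrow
        · exact h1
      apply neg_char row s hrow hs hlen
      intro i hi h1 h2
      unfold D_get_category_name_py at hnd
      by_cases hb : pvNonblank (row.getD i none) = true
      · exact absurd ⟨hs, hrow, i, List.mem_range.mpr hi, h1, h2,
          by rw [pvHasInk_eq]; exact hb⟩ hnd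
      · simpa using hb

theorem get_category_name_py_changed : Claim_changed_get_category_name_py := by
  unfold Claim_changed_get_category_name_py; decide
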